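-- pv_equiv track=rewrite | github.com/tursunait/Agentic_BNY_AI_Compliance | backend/pdf_filler/fill_engine.py | _narrative_fallback_field
-- ===== SOURCE A (Python) =====
-- from typing import Any
--
-- def _narrative_fallback_field(existing_pdf_fields: dict[str, Any]) -> str | None:
--     """Find a PDF field to hold narrative when mapping has no narrative entry."""
--     candidates = []
--     for name in existing_pdf_fields:
--         lower = name.lower()
--         if lower in ("narrative", "description", "additional information"):
--             candidates.append(name)
--         elif "narrative" in lower:
--             candidates.append(name)
--         elif lower == "page 2":
--             candidates.append(name)
--     # Prefer explicit narrative-like names over generic "Page 2"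
--     for c in candidates:
--         if "narrative" in c.lower() or c.lower() in ("description", "additional information"):
--             return c
--     return candidates[0] if candidates else None
-- ===== SOURCE B (Python) =====
-- def _narrative_fallback_field(existing_pdf_fields):
--     """Find a PDF field to hold narrative when mapping has no narrative entry."""
--     page2_fallback = None
--     for name in existing_pdf_fields:
--         lower = name.lower()
--         if "narrative" in lower or lower in ("description", "additional information"):
--             return name
--         if lower == "page 2" and page2_fallback is None:
--             page2_fallback = name
--     return page2_fallback
-- ===== Notes on version B (the rewrite author's own statement) =====
-- stated objective: simpler
-- what changed: B replaces A's candidate-list build plus second preference pass (and trailing candidates[0] fallback) with one single pass that returns the first narrative-like name immediately and keeps only the first 'page 2' name in a fallback variable.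
import Mathlib
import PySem

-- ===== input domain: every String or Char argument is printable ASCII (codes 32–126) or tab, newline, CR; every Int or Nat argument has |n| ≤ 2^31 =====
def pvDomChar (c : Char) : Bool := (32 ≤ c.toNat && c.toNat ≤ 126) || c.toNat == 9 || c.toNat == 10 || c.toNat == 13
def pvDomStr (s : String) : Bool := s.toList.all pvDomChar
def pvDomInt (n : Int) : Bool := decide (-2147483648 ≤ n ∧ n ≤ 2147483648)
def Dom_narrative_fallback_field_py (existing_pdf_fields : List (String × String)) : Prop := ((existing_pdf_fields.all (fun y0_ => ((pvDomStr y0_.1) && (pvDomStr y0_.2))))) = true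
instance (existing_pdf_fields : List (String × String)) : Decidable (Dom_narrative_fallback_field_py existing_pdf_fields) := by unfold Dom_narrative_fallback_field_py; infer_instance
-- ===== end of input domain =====

-- B is a single pass (return first narrative-like name, remember first "page 2" as fallback)
-- instead of A's candidate-list build plus second preference pass: simpler.

-- ===== PORT A =====
-- first loop body: append candidates in order
def pvAStep (acc : List String) (name : String) : List String :=
  let lower := PySem.Str.lower name
  if lower == "narrative" || lower == "description" || lower == "additional information" then
    acc ++ [name]
  else if PySem.Str.isIn "narrative" lower then
    acc ++ [name]
  else if lower == "page 2" then
    acc ++ [name]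
  else acc

-- second loop: first candidate with a narrative-like name ('return c' = some)
def pvAFind : List String → Option String
  | [] => none
  | c :: rest =>
    if PySem.Str.isIn "narrative" (PySem.Str.lower c) ||
       PySem.Str.lower c == "description" || PySem.Str.lower c == "additional information" then
      some c
    else pvAFind rest

def narrative_fallback_field_py (existing_pdf_fields : List (String × String)) : Option String :=
  -- 'for name in existing_pdf_fields' iterates the dict's keys (first occurrences, in order)
  let keys := PySem.List.dedup (existing_pdf_fields.map Prod.fst)
  let candidates := keys.foldl pvAStep []
  match pvAFind candidates with
  | some c => some c
  | none => candidates.head?   -- candidates[0] if candidates else None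

-- ===== PORT B =====
def pvBLoop : List String → Option String → Option String
  | [], page2_fallback => page2_fallback
  | name :: rest, page2_fallback =>
    let lower := PySem.Str.lower name
    if PySem.Str.isIn "narrative" lower ||
       lower == "description" || lower == "additional information" then
      some name
    else
      pvBLoop rest
        (if lower == "page 2" && page2_fallback.isNone then some name else page2_fallback)

def narrative_fallback_field_py_alt (existing_pdf_fields : List (String × String)) : Option String :=
  pvBLoop (PySem.List.dedup (existing_pdf_fields.map Prod.fst)) none

-- ===== PRECONDITION & SPEC =====
def Spec_narrative_fallback_field_py (existing_pdf_fields : List (String × String)) (out : Option String) : Prop := out = narrative_fallback_field_py_alt existing_pdf_fields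
instance (existing_pdf_fields : List (String × String)) (out : Option String) : Decidable (Spec_narrative_fallback_field_py existing_pdf_fields out) := by unfold Spec_narrative_fallback_field_py; infer_instance

-- ===== CLAIM (what is proved, stated in full; the proofs are below) =====
def Claim_equal_narrative_fallback_field_py : Prop := ∀ (existing_pdf_fields : List (String × String)), Dom_narrative_fallback_field_py existing_pdf_fields → Spec_narrative_fallback_field_py existing_pdf_fields (narrative_fallback_field_py existing_pdf_fields)

-- ===== LEMMAS AND PROOFS =====

lemma pvAStep_eq (acc : List String) (name : String) :
    pvAStep acc name = acc ++ pvAStep [] name := by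
  unfold pvAStep
  dsimp only
  split_ifs <;> simp

lemma foldl_pvAStep_append (keys : List String) (acc : List String) :
    keys.foldl pvAStep acc = acc ++ keys.foldl pvAStep [] := by
  induction keys generalizing acc with
  | nil => simp
  | cons k ks ih =>
    simp only [List.foldl_cons]
    rw [ih (pvAStep acc k), ih (pvAStep [] k), pvAStep_eq acc k, List.append_assoc]

lemma pvAFind_append (l1 l2 : List String) :
    pvAFind (l1 ++ l2) = (pvAFind l1).or (pvAFind l2) := by
  induction l1 with
  | nil => simp [pvAFind]
  | cons c rest ih =>
    simp only [List.cons_append, pvAFind]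
    split_ifs <;> simp [ih]

lemma pv_main (keys : List String) :
    ∀ (acc : List String) (fb : Option String),
      pvAFind acc = none → acc.head? = fb →
      (match pvAFind (keys.foldl pvAStep acc) with
       | some c => some c
       | none => (keys.foldl pvAStep acc).head?) = pvBLoop keys fb := by
  induction keys with
  | nil =>
    intro acc fb h1 h2
    simp [pvBLoop, h1, h2]
  | cons name rest ih =>
    intro acc fb h1 h2
    simp only [List.foldl_cons, pvBLoop]
    by_cases hb : (PySem.Str.isIn "narrative" (PySem.Str.lower name) ||
        PySem.Str.lower name == "description" ||
        PySem.Str.lower name == "additional information") = true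
    · -- B returns `some name`; A's candidates start (after acc) with name, which pvAFind hits
      rw [if_pos hb]
      have hstep : pvAStep acc name = acc ++ [name] := by
        unfold pvAStep
        dsimp only
        simp only [Bool.or_eq_true, beq_iff_eq] at hb
        split_ifs with hA hB hC
        · rfl
        · rfl
        · rfl
        · exfalso; simp only [Bool.or_eq_true, beq_iff_eq, not_or] at hA
          rcases hb with (hb | hb) | hb
          · exact hB hb
          · exact hA.1.2 hb
          · exact hA.2 hb
      rw [hstep, foldl_pvAStep_append, List.append_assoc, pvAFind_append, h1,
        Option.none_or, pvAFind_append]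
      have : pvAFind [name] = some name := by
        simp only [pvAFind]
        rw [if_pos hb]
      simp [this]
    · rw [if_neg hb]
      by_cases hp : PySem.Str.lower name == "page 2"
      · -- page2 candidate: A appends, B records the fallback if empty
        have hstep : pvAStep acc name = acc ++ [name] := by
          unfold pvAStep
          dsimp only
          have hpe : PySem.Str.lower name = "page 2" := by simpa using hp
          simp only [Bool.or_eq_true, beq_iff_eq, not_or] at hb
          rw [if_neg (by rw [hpe]; decide), if_neg hb.1.1, if_pos hp]
        rw [hstep]
        have hfind : pvAFind (acc ++ [name]) = none := by
          rw [pvAFind_append, h1, Option.none_or]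
          simp only [pvAFind]
          rw [if_neg hb]
        have hhead : (acc ++ [name]).head? =
            (if (PySem.Str.lower name == "page 2") && fb.isNone then some name else fb) := by
          cases acc with
          | nil =>
            simp only [List.head?_nil] at h2
            simp [hp, ← h2]
          | cons a t =>
            simp only [List.head?_cons] at h2
            simp [← h2]
        exact hhead ▸ ih (acc ++ [name]) _ hfind rfl
      · -- not a candidate at all
        have hstep : pvAStep acc name = acc := by
          unfold pvAStep
          dsimp only
          simp only [Bool.or_eq_true, beq_iff_eq, not_or] at hb
          have hn : ¬ PySem.Str.lower name = "narrative" := by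
            intro h
            apply hb.1.1
            rw [h]
            decide
          rw [if_neg (by simp [hn, hb.1.2, hb.2]), if_neg hb.1.1, if_neg hp]
        have hfb : (if (PySem.Str.lower name == "page 2") && fb.isNone then some name else fb)
            = fb := by simp [hp]
        rw [hstep, hfb]
        exact ih acc fb h1 h2

-- ===== VERDICT (by name: the statement is the Claim_ definition above) =====
theorem narrative_fallback_field_py_spec : Claim_equal_narrative_fallback_field_py := by
  intro fields _
  unfold Spec_narrative_fallback_field_py narrative_fallback_field_py narrative_fallback_field_py_alt
  exact pv_main _ [] none rfl rfl
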